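-- pv_equiv track=rewrite | github.com/MaselLab/ProteinEvolution | Metrics/RunTangoInParallel.py | SequencePassed_TangoQualityControl
-- ===== SOURCE A (Python) =====
-- def SequencePassed_TangoQualityControl(Sequence):
--     # It will look for runs of X's (unknown residues) of three or more in length.
--     XRun = 0
--     # Each residue in the sequence is searched
--     for residue in Sequence:
--         # If an unknown residue is found, a run begins
--         if residue == 'X':
--             # Each X in succession adds one to the length of the run
--             XRun += 1
--         # If the residue is known, the "run" ends. This could either be a "true" run (where XRun =/= 0), or it could follow another known residue. Either way, each time a known residue is found, the run length is checked
--         else: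
--             # If the length of the run is greater than or equal to 3, the sequence does not pass this quality filter and the check is immediately returned as False for the user
--             if XRun >= 3:
--                 return False
--             # So long as the run is below 3, the check continues and XRun is reset to 0
--             else:
--                 XRun = 0
--     # If no runs >= 3 were found, the sequence passes the quality check and the user is returned True
--     return True
-- ===== SOURCE B (Python) =====
-- from itertools import groupby
--
-- def SequencePassed_TangoQualityControl(Sequence):
--     # Run-length encode the sequence; a run of X's only fails the filter when
--     # something follows it, i.e. it is not the final group.
--     groups = [(ch, sum(1 for _ in g)) for ch, g in groupby(Sequence)]
--     for ch, n in groups[:-1]: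
--         if ch == 'X' and n >= 3:
--             return False
--     return True
-- ===== Notes on version B (the rewrite author's own statement) =====
-- stated objective: idiomatic
-- what changed: B run-length encodes the sequence with itertools.groupby and scans the (char,length) groups except the final one for an X-run of length >= 3, instead of A's per-character loop with a manual run counter (the final group is excluded because A never checks a trailing X-run).
import Mathlib
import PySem

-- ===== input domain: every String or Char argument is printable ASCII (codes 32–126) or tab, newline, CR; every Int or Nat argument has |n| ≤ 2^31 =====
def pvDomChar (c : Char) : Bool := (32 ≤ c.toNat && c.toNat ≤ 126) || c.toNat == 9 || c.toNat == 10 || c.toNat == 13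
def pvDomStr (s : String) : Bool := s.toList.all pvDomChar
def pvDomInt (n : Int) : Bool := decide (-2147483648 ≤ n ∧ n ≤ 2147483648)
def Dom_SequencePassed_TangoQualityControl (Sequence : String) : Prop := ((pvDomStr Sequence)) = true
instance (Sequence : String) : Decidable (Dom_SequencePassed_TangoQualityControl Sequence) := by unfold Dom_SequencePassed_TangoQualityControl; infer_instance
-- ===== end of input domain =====

-- B rewrites A's per-character run counter as a run-length encoding scanned over
-- all groups except the last (idiomatic; same O(n) cost).

-- ===== PORT A =====
-- A's for-loop with early return, carrying the running X-count.
def pvGoA : List Char → Nat → Bool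
  | [], _ => true
  | residue :: rest, xrun =>
    if residue = 'X' then pvGoA rest (xrun + 1)
    else if 3 ≤ xrun then false else pvGoA rest 0

def SequencePassed_TangoQualityControl (Sequence : String) : Bool :=
  pvGoA Sequence.toList 0

-- ===== PORT B =====
-- run-length encoding, as itertools.groupby produces it
def pvRle : List Char → List (Char × Nat)
  | [] => []
  | c :: rest =>
    match pvRle rest with
    | [] => [(c, 1)]
    | (d, n) :: t => if c = d then (d, n + 1) :: t else (c, 1) :: (d, n) :: t

-- B's for-loop over groups[:-1] with early return
def pvLoopB : List (Char × Nat) → Bool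
  | [] => true
  | (ch, n) :: rest => if ch = 'X' ∧ 3 ≤ n then false else pvLoopB rest

def SequencePassed_TangoQualityControl_alt (Sequence : String) : Bool :=
  pvLoopB (pvRle Sequence.toList).dropLast

-- ===== PRECONDITION & SPEC =====
def Spec_SequencePassed_TangoQualityControl (Sequence : String) (out : Bool) : Prop := out = SequencePassed_TangoQualityControl_alt Sequence
instance (Sequence : String) (out : Bool) : Decidable (Spec_SequencePassed_TangoQualityControl Sequence out) := by unfold Spec_SequencePassed_TangoQualityControl; infer_instance

-- ===== CLAIM (what is proved, stated in full; the proofs are below) =====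
def Claim_equal_SequencePassed_TangoQualityControl : Prop := ∀ (Sequence : String), Dom_SequencePassed_TangoQualityControl Sequence → Spec_SequencePassed_TangoQualityControl Sequence (SequencePassed_TangoQualityControl Sequence)

-- ===== LEMMAS AND PROOFS =====

-- prepend a pending X-run of length `run` onto a group list (merging with a leading X-group)
def pvExtX (run : Nat) (g : List (Char × Nat)) : List (Char × Nat) :=
  match g with
  | (d, n) :: t => if d = 'X' then ('X', run + n) :: t else ('X', run) :: (d, n) :: t
  | [] => [('X', run)]

theorem pvLoopB_dropLast_cons_notX (c : Char) (k m : Nat) (t : List (Char × Nat))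
    (hc : c ≠ 'X') :
    pvLoopB (((c, k) :: t).dropLast) = pvLoopB (((c, m) :: t).dropLast) := by
  cases t with
  | nil => rfl
  | cons p t' =>
    simp only [List.dropLast_cons₂, pvLoopB]
    simp [hc]

theorem pvLoopB_extX_notX (run : Nat) (c : Char) (n : Nat) (t : List (Char × Nat))
    (hc : c ≠ 'X') :
    pvLoopB ((pvExtX run ((c, n) :: t)).dropLast)
      = if 3 ≤ run then false else pvLoopB (((c, n) :: t).dropLast) := by
  simp only [pvExtX, hc, if_false]
  cases t with
  | nil => simp [pvLoopB]
  | cons p t' =>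
    simp only [List.dropLast_cons₂, pvLoopB]
    split_ifs with h <;> simp_all

theorem pvLoopB_extX_zero (g : List (Char × Nat)) :
    pvLoopB ((pvExtX 0 g).dropLast) = pvLoopB g.dropLast := by
  cases g with
  | nil => rfl
  | cons p t =>
    obtain ⟨d, n⟩ := p
    by_cases hd : d = 'X'
    · subst hd; simp [pvExtX]
    · rw [pvLoopB_extX_notX 0 d n t hd]; simp

-- when c ≠ 'X', dropping the leading group-extension by c does not change the verdict
theorem pvLoopB_rle_cons_notX (c : Char) (rest : List Char) (hc : c ≠ 'X') :
    pvLoopB ((pvRle (c :: rest)).dropLast) = pvLoopB ((pvRle rest).dropLast) := by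
  simp only [pvRle]
  cases h : pvRle rest with
  | nil => rfl
  | cons p t =>
    obtain ⟨d, n⟩ := p
    by_cases hdc : c = d
    · subst hdc
      simp only [pvRle, if_pos rfl]
      exact pvLoopB_dropLast_cons_notX c (n + 1) n t hc
    · simp only [if_neg hdc]
      cases t with
      | nil => simp [pvLoopB, hc]
      | cons q t' =>
        simp only [List.dropLast_cons₂, pvLoopB]
        simp [hc]

theorem pvExtX_rle_X (run : Nat) (rest : List Char) :
    pvExtX run (pvRle ('X' :: rest)) = pvExtX (run + 1) (pvRle rest) := by
  cases h : pvRle rest with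
  | nil => simp [pvRle, h, pvExtX]
  | cons p t =>
    obtain ⟨d, n⟩ := p
    by_cases hd : ('X' : Char) = d
    · subst hd
      have e : run + (n + 1) = run + 1 + n := by omega
      simp [pvRle, h, pvExtX, e]
    · have hd' : d ≠ 'X' := fun h' => hd h'.symm
      simp [pvRle, h, pvExtX, hd, hd']

theorem pvRle_eq_nil (xs : List Char) (h : pvRle xs = []) : xs = [] := by
  cases xs with
  | nil => rfl
  | cons c rest =>
    cases h' : pvRle rest with
    | nil => simp [pvRle, h'] at h
    | cons p t => obtain ⟨d, n⟩ := p; simp only [pvRle, h'] at h; split_ifs at h <;> exact absurd h (List.cons_ne_nil _ _)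

-- main invariant: A's loop with pending run `run` equals B's scan of the
-- group list with that run prepended, minus the final group
theorem pvGoA_eq (xs : List Char) : ∀ run : Nat,
    pvGoA xs run = pvLoopB ((pvExtX run (pvRle xs)).dropLast) := by
  induction xs with
  | nil => intro run; rfl
  | cons c rest ih =>
    intro run
    by_cases hc : c = 'X'
    · subst hc
      rw [show pvGoA ('X' :: rest) run = pvGoA rest (run + 1) from rfl]
      rw [ih (run + 1), pvExtX_rle_X]
    · simp only [pvGoA, if_neg hc]
      cases h : pvRle (c :: rest) with
      | nil => exact absurd (pvRle_eq_nil _ h) (by simp)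
      | cons p t =>
        obtain ⟨d, n⟩ := p
        have hd : d = c := by
          cases h' : pvRle rest with
          | nil => simp only [pvRle, h'] at h; simp_all
          | cons q t' =>
            obtain ⟨e, m⟩ := q
            simp only [pvRle, h'] at h
            split_ifs at h with he <;> simp_all
        subst hd
        rw [pvLoopB_extX_notX run d n t hc, ← h]
        split_ifs with h3
        · rfl
        · rw [ih 0, pvLoopB_extX_zero, pvLoopB_rle_cons_notX d rest hc]

-- ===== VERDICT (by name: the statement is the Claim_ definition above) =====
theorem SequencePassed_TangoQualityControl_spec : Claim_equal_SequencePassed_TangoQualityControl := by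
  intro Sequence _
  show _ = _
  unfold SequencePassed_TangoQualityControl SequencePassed_TangoQualityControl_alt
  rw [pvGoA_eq Sequence.toList 0]
  exact (pvLoopB_extX_zero _)
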